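-- pv_equiv track=rewrite | github.com/checheng117/relation-aware-3d-grounding | scripts/postprocess_bc_multiseed_report.py | _priority_keys
-- ===== SOURCE A (Python) =====
-- def _priority_keys(keys: list[str]) -> list[str]:
--     pref = [
--         "acc@1_subset::same_class_clutter",
--         "acc@1_subset::anchor_confusion",
--         "acc@1_subset::low_model_margin",
--         "acc@1_subset::parser_failure",
--         "acc@1_subset::geometry_high_fallback",
--         "acc@1_slice::geometry_fallback_gt_half",
--         "acc@1_slice::geometry_fallback_le_half",
--         "acc@1_subset::weak_feature_source",
--         "acc@1_subset::occlusion_heavy",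
--     ]
--     ordered = [k for k in pref if k in keys]
--     for k in sorted(keys):
--         if k not in ordered and ("subset::" in k or "slice::" in k):
--             ordered.append(k)
--     return ordered[:12]
-- ===== SOURCE B (Python) =====
-- def _priority_keys(keys: list[str]) -> list[str]:
--     pref = [
--         "acc@1_subset::same_class_clutter",
--         "acc@1_subset::anchor_confusion",
--         "acc@1_subset::low_model_margin",
--         "acc@1_subset::parser_failure",
--         "acc@1_subset::geometry_high_fallback",
--         "acc@1_slice::geometry_fallback_gt_half",
--         "acc@1_slice::geometry_fallback_le_half",
--         "acc@1_subset::weak_feature_source",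
--         "acc@1_subset::occlusion_heavy",
--     ]
--     cands = {k for k in keys if "subset::" in k or "slice::" in k}
--     return sorted(cands, key=lambda k: (pref.index(k) if k in pref else len(pref), k))[:12]
-- ===== Notes on version B (the rewrite author's own statement) =====
-- stated objective: idiomatic
-- what changed: Replaces A's two-phase construction (preference filter pass, then a sorted scan appending keys not yet in the growing list) with a single ranked sort: dedup the subset::/slice:: candidates into a set and sort them once by the tuple key (preference rank, key), then slice [:12].
import Mathlib
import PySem

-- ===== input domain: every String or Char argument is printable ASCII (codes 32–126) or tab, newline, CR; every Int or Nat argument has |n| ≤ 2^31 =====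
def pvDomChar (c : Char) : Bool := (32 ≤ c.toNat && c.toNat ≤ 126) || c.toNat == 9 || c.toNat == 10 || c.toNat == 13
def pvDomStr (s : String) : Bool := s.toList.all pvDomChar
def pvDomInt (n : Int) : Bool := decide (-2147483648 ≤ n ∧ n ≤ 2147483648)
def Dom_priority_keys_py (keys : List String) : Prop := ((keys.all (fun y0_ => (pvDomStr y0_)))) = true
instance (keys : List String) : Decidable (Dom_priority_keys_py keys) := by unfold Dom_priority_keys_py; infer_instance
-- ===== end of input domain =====

-- B replaces A's two-phase filter-then-sorted-append construction by one ranked sort (idiomatic, same cost).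

-- ===== PORT A =====
-- the literal `pref` list both Pythons write out
def pvPref : List String := [
  "acc@1_subset::same_class_clutter",
  "acc@1_subset::anchor_confusion",
  "acc@1_subset::low_model_margin",
  "acc@1_subset::parser_failure",
  "acc@1_subset::geometry_high_fallback",
  "acc@1_slice::geometry_fallback_gt_half",
  "acc@1_slice::geometry_fallback_le_half",
  "acc@1_subset::weak_feature_source",
  "acc@1_subset::occlusion_heavy"]

def priority_keys_py (keys : List String) : List String :=
  let pref := pvPref
  let ordered := pref.filter (fun k => keys.contains k)
  let ordered := (PySem.List.sorted keys (fun k => k)).foldl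
    (fun acc k =>
      if !acc.contains k && (PySem.Str.isIn "subset::" k || PySem.Str.isIn "slice::" k)
      then acc ++ [k] else acc) ordered
  PySem.List.slice ordered none (some 12)

-- ===== PORT B =====
def priority_keys_py_alt (keys : List String) : List String :=
  let pref := pvPref
  let cands : PySem.Set String :=
    PySem.Set.ofList (keys.filter (fun k => PySem.Str.isIn "subset::" k || PySem.Str.isIn "slice::" k))
  -- `pref.index(k) if k in pref else len(pref)`: the index? lookup is guarded by `k in pref`, so `.getD 0` is never the fallback
  PySem.List.slice
    (PySem.List.sorted2 cands
      (fun k => if pref.contains k then (((PySem.List.index? pref k).getD 0 : Nat) : Int) else (pref.length : Int))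
      (fun k => k))
    none (some 12)

-- ===== PRECONDITION & SPEC =====
def Spec_priority_keys_py (keys : List String) (out : List String) : Prop := out = priority_keys_py_alt keys
instance (keys : List String) (out : List String) : Decidable (Spec_priority_keys_py keys out) := by unfold Spec_priority_keys_py; infer_instance

-- ===== CLAIM (what is proved, stated in full; the proofs are below) =====
def Claim_equal_priority_keys_py : Prop := ∀ (keys : List String), Dom_priority_keys_py keys → Spec_priority_keys_py keys (priority_keys_py keys)

-- ===== LEMMAS AND PROOFS =====

-- B's rank function, named for the proofs (definitionally the lambda in the port of B)
def pvRk (k : String) : Int :=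
  if pvPref.contains k then (((PySem.List.index? pvPref k).getD 0 : Nat) : Int) else (pvPref.length : Int)

-- the filter predicate both Pythons write inline
def pvPred (k : String) : Bool := PySem.Str.isIn "subset::" k || PySem.Str.isIn "slice::" k

-- sorted2 with LinearOrder component keys IS sorted by the lexicographic pair key
theorem pv_before_eq (k1 : String → Int) (k2 : String → String) (a b : String) :
    (decide (k1 a < k1 b) || (!decide (k1 b < k1 a) && decide (k2 a < k2 b)))
      = decide ((toLex (k1 a, k2 a) : Int ×ₗ String) < toLex (k1 b, k2 b)) := by
  rcases lt_trichotomy (k1 a) (k1 b) with h | h | h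
  · simp [Prod.Lex.lt_iff, h]
  · simp [Prod.Lex.lt_iff, h]
  · simp [Prod.Lex.lt_iff, h, lt_asymm h, (ne_of_gt h)]

theorem pv_sorted2_eq_sorted_lex (xs : List String) (k1 : String → Int) (k2 : String → String) :
    PySem.List.sorted2 xs k1 k2 = PySem.List.sorted xs (fun x => (toLex (k1 x, k2 x) : Int ×ₗ String)) := by
  show List.foldl (fun acc x => PySem.List.insertBy
      (fun a b => decide (k1 a < k1 b) || (!decide (k1 b < k1 a) && decide (k2 a < k2 b))) x acc) [] xs
    = List.foldl (fun acc x => PySem.List.insertBy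
      (fun a b => decide ((toLex (k1 a, k2 a) : Int ×ₗ String) < toLex (k1 b, k2 b))) x acc) [] xs
  have h : (fun (a b : String) => decide (k1 a < k1 b) || (!decide (k1 b < k1 a) && decide (k2 a < k2 b)))
      = fun a b => decide ((toLex (k1 a, k2 a) : Int ×ₗ String) < toLex (k1 b, k2 b)) := by
    funext a b; exact pv_before_eq k1 k2 a b
  rw [h]

-- PySem.Set.ofList keeps first occurrences in order: it is a sublist
theorem pv_foldl_add_sublist {α : Type} [BEq α] (xs : List α) :
    ∀ acc : List α, ∃ t, List.foldl PySem.Set.add acc xs = acc ++ t ∧ t.Sublist xs := by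
  induction xs with
  | nil => intro acc; exact ⟨[], by simp, List.Sublist.refl _⟩
  | cons x xs ih =>
    intro acc
    simp only [List.foldl_cons]
    by_cases h : acc.contains x = true
    · rw [show PySem.Set.add acc x = acc from by simp [PySem.Set.add, h]]
      obtain ⟨t, ht, hs⟩ := ih acc
      exact ⟨t, ht, hs.cons x⟩
    · rw [show PySem.Set.add acc x = acc ++ [x] from by simp [PySem.Set.add, h]]
      obtain ⟨t, ht, hs⟩ := ih (acc ++ [x])
      exact ⟨x :: t, by simpa using ht, hs.cons₂ x⟩

theorem pv_ofList_sublist {α : Type} [BEq α] (xs : List α) :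
    (PySem.Set.ofList xs).Sublist xs := by
  obtain ⟨t, ht, hs⟩ := pv_foldl_add_sublist xs []
  rw [PySem.Set.ofList_eq_foldl, ht]; simpa using hs

-- A's dedup-append loop is Set.update on the filtered list
theorem pv_foldl_eq_update {α : Type} [BEq α] (p : α → Bool) (l : List α) :
    ∀ acc : List α,
      l.foldl (fun acc k => if !acc.contains k && p k then acc ++ [k] else acc) acc
        = PySem.Set.update acc (l.filter p) := by
  induction l with
  | nil => intro acc; simp [PySem.Set.update]
  | cons k l ih =>
    intro acc
    rw [List.foldl_cons, ih, List.filter_cons]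
    by_cases hp : p k = true
    · have hstep : (if (!acc.contains k && p k) = true then acc ++ [k] else acc)
          = PySem.Set.add acc k := by
        by_cases hc : acc.contains k = true <;>
          simp [PySem.Set.add, PySem.Set.contains_eq_listContains, hp, hc]
      rw [hstep, if_pos hp]
      rfl
    · simp [hp]

-- rank facts about the literal pref list
theorem pv_rk_lt_of_mem : ∀ a ∈ pvPref, pvRk a < 9 := by decide
theorem pv_rk_of_not_mem {a : String} (h : a ∉ pvPref) : pvRk a = 9 := by
  have hc : pvPref.contains a = false := by simp [List.contains_eq_mem, h]
  unfold pvRk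
  rw [hc]
  simp [pvPref]
theorem pv_pref_pairwise : pvPref.Pairwise (fun a b => pvRk a < pvRk b) := by decide
theorem pv_pref_nodup : pvPref.Nodup := by decide
theorem pv_pref_pred : ∀ a ∈ pvPref, pvPred a = true := by decide

theorem pv_strict_of_le_of_nodup {l : List String} {f : String → String}
    (hle : l.Pairwise (fun a b => f a ≤ f b)) (hinj : ∀ a b, f a = f b → a = b)
    (hnd : l.Nodup) : l.Pairwise (fun a b => f a < f b) :=
  (hle.and hnd).imp (fun h => lt_of_le_of_ne h.1 (fun he => h.2 (hinj _ _ he)))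

-- the final key used on B's side
def pvKey (k : String) : Int ×ₗ String := toLex (pvRk k, k)

theorem pv_main (keys : List String) : priority_keys_py keys = priority_keys_py_alt keys := by
  classical
  -- abbreviations
  set pred := pvPred with hpred
  have hC : ∀ x, x ∈ PySem.Set.ofList (keys.filter pred) ↔ x ∈ keys ∧ pred x = true := by
    intro x; rw [PySem.Set.mem_ofList, List.mem_filter]
  set C : List String := PySem.Set.ofList (keys.filter pred) with hCdef
  set P : List String := pvPref.filter (fun k => keys.contains k) with hP
  set q : String → Bool := fun k => !pvPref.contains k with hq
  set S : List String := PySem.List.sorted (C.filter q) (fun k => k) with hS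
  have hCnd : C.Nodup := PySem.Set.nodup_ofList _
  have hPnd : P.Nodup := pv_pref_nodup.filter _
  have hmemP : ∀ x, x ∈ P ↔ x ∈ pvPref ∧ x ∈ keys := by
    intro x; simp [hP, List.mem_filter]
  have hmemS : ∀ x, x ∈ S ↔ x ∈ C ∧ x ∉ pvPref := by
    intro x; simp [hS, PySem.List.mem_sorted, List.mem_filter, hq]
  -- rank values on the two blocks
  have hrkP : ∀ x ∈ P, pvRk x < 9 := fun x hx => pv_rk_lt_of_mem x ((hmemP x).1 hx).1
  have hrkS : ∀ x ∈ S, pvRk x = 9 := fun x hx => pv_rk_of_not_mem ((hmemS x).1 hx).2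
  -- L := P ++ S is pairwise strictly increasing for pvKey
  have hpairP : P.Pairwise (fun a b => pvKey a < pvKey b) := by
    have := (pv_pref_pairwise.sublist List.filter_sublist :
      P.Pairwise (fun a b => pvRk a < pvRk b))
    exact this.imp (fun h => by simp [pvKey, Prod.Lex.lt_iff]; omega)
  have hpairS : S.Pairwise (fun a b => pvKey a < pvKey b) := by
    have hle : S.Pairwise (fun a b => a ≤ b) := PySem.List.sorted_pairwise _ _
    have hnd : S.Nodup :=
      ((PySem.List.sorted_perm (C.filter q) (fun k => k) false).nodup_iff).mpr (hCnd.filter q)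
    have hlt : S.Pairwise (fun a b => a < b) :=
      pv_strict_of_le_of_nodup hle (fun a b h => h) hnd
    refine hlt.imp_of_mem (fun {a b} ha hb h => ?_)
    simp [pvKey, Prod.Lex.lt_iff, hrkS a ha, hrkS b hb, h]
  have hcross : ∀ a ∈ P, ∀ b ∈ S, pvKey a < pvKey b := by
    intro a ha b hb
    have : pvRk a < pvRk b := by rw [hrkS b hb]; exact hrkP a ha
    simp [pvKey, Prod.Lex.lt_iff]; omega
  have hpairL : (P ++ S).Pairwise (fun a b => pvKey a < pvKey b) :=
    List.pairwise_append.2 ⟨hpairP, hpairS, hcross⟩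
  -- L is a permutation of C
  have hPperm : P.Perm (C.filter (fun k => pvPref.contains k)) := by
    rw [List.perm_ext_iff_of_nodup hPnd (hCnd.filter _)]
    intro x
    simp only [hmemP, List.mem_filter, hC, List.contains_iff_mem]
    constructor
    · rintro ⟨hpp, hk⟩
      exact ⟨⟨hk, pv_pref_pred x hpp⟩, hpp⟩
    · rintro ⟨hc, hpp⟩
      exact ⟨hpp, hc.1⟩
  have hSperm : S.Perm (C.filter q) := PySem.List.sorted_perm _ _ _
  have hLperm : (P ++ S).Perm C := by
    refine ((hPperm.append hSperm).trans ?_)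
    simpa [hq] using List.filter_append_perm (fun k => pvPref.contains k) C
  -- B's side equals L ++ take
  have hB : priority_keys_py_alt keys = (P ++ S).take 12 := by
    show PySem.List.slice (PySem.List.sorted2 C
        (fun k => if pvPref.contains k then (((PySem.List.index? pvPref k).getD 0 : Nat) : Int) else (pvPref.length : Int))
        (fun k => k)) none (some 12) = (P ++ S).take 12
    rw [pv_sorted2_eq_sorted_lex]
    have hkeyeq : (fun x => toLex ((if pvPref.contains x then (((PySem.List.index? pvPref x).getD 0 : Nat) : Int) else (pvPref.length : Int)), x)) = pvKey := by
      funext x; simp [pvKey, pvRk]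
    rw [hkeyeq, PySem.List.sorted_eq_of_perm_of_pairwise_lt C (P ++ S) pvKey hLperm hpairL,
      PySem.List.slice_to _ (by norm_num)]
    rfl
  -- A's side equals L ++ take
  have hA : priority_keys_py keys = (P ++ S).take 12 := by
    show PySem.List.slice ((PySem.List.sorted keys (fun k => k)).foldl
      (fun acc k => if !acc.contains k && pred k then acc ++ [k] else acc) P) none (some 12) = (P ++ S).take 12
    have htail : (PySem.Set.ofList ((PySem.List.sorted keys (fun k => k)).filter pred)).filter
        (fun y => !PySem.Set.contains P y) = S := by
      set ysA : List String := (PySem.Set.ofList ((PySem.List.sorted keys (fun k => k)).filter pred)).filter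
        (fun y => !PySem.Set.contains P y) with hys
      have hysnd : ysA.Nodup := (PySem.Set.nodup_ofList _).filter _
      have hysmem : ∀ x, x ∈ ysA ↔ (x ∈ keys ∧ pred x = true) ∧ x ∉ pvPref := by
        intro x
        simp only [hys, List.mem_filter, PySem.Set.mem_ofList, PySem.List.mem_sorted,
          PySem.Set.contains_eq_listContains, Bool.not_eq_true', List.contains_eq_mem,
          hmemP, decide_eq_false_iff_not]
        constructor
        · rintro ⟨⟨hk, hp⟩, hnp⟩
          exact ⟨⟨hk, hp⟩, fun hpp => hnp ⟨hpp, hk⟩⟩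
        · rintro ⟨⟨hk, hp⟩, hnp⟩
          exact ⟨⟨hk, hp⟩, fun h => hnp h.1⟩
      have hysperm : ysA.Perm (C.filter q) := by
        rw [List.perm_ext_iff_of_nodup hysnd (hCnd.filter _)]
        intro x
        simp only [hysmem, List.mem_filter, hC, hq, Bool.not_eq_true', List.contains_eq_mem,
          decide_eq_false_iff_not]
      have hyspair : ysA.Pairwise (fun a b => a < b) := by
        have h1 : ((PySem.List.sorted keys (fun k => k)).filter pred).Pairwise (fun a b => a ≤ b) :=
          (PySem.List.sorted_pairwise keys (fun k => k)).sublist List.filter_sublist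
        have h2 : (PySem.Set.ofList ((PySem.List.sorted keys (fun k => k)).filter pred)).Pairwise (fun a b => a ≤ b) :=
          h1.sublist (pv_ofList_sublist _)
        have h3 : ysA.Pairwise (fun a b => a ≤ b) := h2.sublist List.filter_sublist
        exact pv_strict_of_le_of_nodup h3 (fun a b h => h) hysnd
      exact (PySem.List.sorted_eq_of_perm_of_pairwise_lt (C.filter q) ysA _ hysperm hyspair).symm
    rw [pv_foldl_eq_update pred _ P, PySem.Set.update_eq_append_filter, htail,
      PySem.List.slice_to _ (by norm_num)]
    rfl
  rw [hA, hB]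

-- ===== VERDICT (by name: the statement is the Claim_ definition above) =====
theorem priority_keys_py_spec : Claim_equal_priority_keys_py := by
  intro keys _
  unfold Spec_priority_keys_py
  exact pv_main keys
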